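-- pv_equiv track=rewrite | github.com/tda-juanes/tp2 | tests.py | calcular_ganancia
-- ===== SOURCE A (Python) =====
-- def calcular_ganancia(solucion, entrenamientos, energias):
--     ganancia_total = i = 0
--     for entreno, ganancia in zip(solucion, entrenamientos):
--         if entreno:
--             ganancia_total += min(ganancia, energias[i])
--             i += 1
--         else:
--             i = 0
--     return ganancia_total
-- ===== SOURCE B (Python) =====
-- def calcular_ganancia(solucion, entrenamientos, energias):
--     # Staged cut-point decomposition: first list the indices with a falsy flag
--     # (the "cuts"), then sum each gap between consecutive cuts by pure index
--     # arithmetic, the energy index restarting at 0 in every gap.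
--     n = min(len(solucion), len(entrenamientos))
--     cortes = [-1] + [k for k in range(n) if not solucion[k]] + [n]
--     total = 0
--     for a, b in zip(cortes, cortes[1:]):
--         for j in range(b - a - 1):
--             total += min(entrenamientos[a + 1 + j], energias[j])
--     return total
-- ===== Notes on version B (the rewrite author's own statement) =====
-- stated objective: alternative
-- what changed: Replaces A's single stateful pass with a reset counter by two staged passes: first collect the cut positions (indices with a falsy flag) into a list, then sum each gap between consecutive cuts by pure index arithmetic min(entrenamientos[a+1+j], energias[j]).
import Mathlib
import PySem

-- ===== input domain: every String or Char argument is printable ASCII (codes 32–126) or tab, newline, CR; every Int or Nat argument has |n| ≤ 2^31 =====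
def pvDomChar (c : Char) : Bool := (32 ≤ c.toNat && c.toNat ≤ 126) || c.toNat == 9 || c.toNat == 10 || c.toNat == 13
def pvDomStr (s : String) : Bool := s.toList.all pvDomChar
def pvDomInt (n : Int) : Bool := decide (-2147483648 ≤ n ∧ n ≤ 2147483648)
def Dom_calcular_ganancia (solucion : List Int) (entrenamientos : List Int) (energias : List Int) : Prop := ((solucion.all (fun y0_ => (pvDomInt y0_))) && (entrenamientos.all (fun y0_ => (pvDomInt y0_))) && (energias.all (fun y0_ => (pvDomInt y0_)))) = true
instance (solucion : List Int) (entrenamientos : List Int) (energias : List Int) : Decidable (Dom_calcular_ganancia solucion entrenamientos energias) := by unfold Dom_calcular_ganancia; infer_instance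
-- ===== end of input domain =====

-- B replaces A's stateful reset-counter pass by two staged passes: collect the falsy
-- cut positions, then sum each gap between consecutive cuts by index arithmetic
-- (alternative decomposition, same asymptotic cost).

-- ===== PORT A =====
-- single fold over zip(solucion, entrenamientos) with state (ganancia_total, i)
def calcular_ganancia (solucion : List Int) (entrenamientos : List Int) (energias : List Int) : Int :=
  ((solucion.zip entrenamientos).foldl
    (fun (st : Int × Int) p =>
      if p.1 ≠ 0 then (st.1 + min p.2 (PySem.List.pyGetD energias st.2 0), st.2 + 1)
      else (st.1, 0))
    (0, 0)).1

-- ===== PORT B =====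
-- Source B: cortes = [-1] + [k for k in range(n) if not solucion[k]] + [n], then sum
-- min(entrenamientos[a+1+j], energias[j]) over the gaps between consecutive cuts
def calcular_ganancia_alt (solucion : List Int) (entrenamientos : List Int) (energias : List Int) : Int :=
  let n : Int := min (solucion.length : Int) (entrenamientos.length : Int)
  let cortes : List Int :=
    -1 :: (((PySem.List.pyRange 0 n 1).filter
              (fun k => PySem.List.pyGetD solucion k 0 == 0)) ++ [n])
  (cortes.zip (cortes.drop 1)).foldl
    (fun total ab =>
      (PySem.List.pyRange 0 (ab.2 - ab.1 - 1) 1).foldl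
        (fun t j => t + min (PySem.List.pyGetD entrenamientos (ab.1 + 1 + j) 0)
                            (PySem.List.pyGetD energias j 0)) total) 0

-- ===== PRECONDITION & SPEC =====
-- Pre_ excludes exactly the inputs where A raises IndexError: a run of more than
-- len(energias) consecutive truthy entries in the zipped part of solucion (B raises there too).
def Pre_calcular_ganancia (solucion : List Int) (entrenamientos : List Int) (energias : List Int) : Prop :=
  ∀ j ∈ List.range ((solucion.take (min solucion.length entrenamientos.length)).length),
    j + energias.length < (solucion.take (min solucion.length entrenamientos.length)).length + 1 →
    ∃ d ∈ List.range (energias.length + 1),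
      (solucion.take (min solucion.length entrenamientos.length)).getD (j + d) 0 = 0
instance (solucion : List Int) (entrenamientos : List Int) (energias : List Int) : Decidable (Pre_calcular_ganancia solucion entrenamientos energias) := by unfold Pre_calcular_ganancia; infer_instance

def pvWitness_calcular_ganancia : List Int × List Int × List Int := ([1, 0, 1, 1], [5, 3, 2, 7], [10, 1])

def Spec_calcular_ganancia (solucion : List Int) (entrenamientos : List Int) (energias : List Int) (out : Int) : Prop := out = calcular_ganancia_alt solucion entrenamientos energias
instance (solucion : List Int) (entrenamientos : List Int) (energias : List Int) (out : Int) : Decidable (Spec_calcular_ganancia solucion entrenamientos energias out) := by unfold Spec_calcular_ganancia; infer_instance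

-- ===== CLAIM (what is proved, stated in full; the proofs are below) =====
def Claim_equal_calcular_ganancia : Prop := ∀ (solucion : List Int) (entrenamientos : List Int) (energias : List Int), Dom_calcular_ganancia solucion entrenamientos energias → Pre_calcular_ganancia solucion entrenamientos energias → Spec_calcular_ganancia solucion entrenamientos energias (calcular_ganancia solucion entrenamientos energias)

-- ===== LEMMAS AND PROOFS =====

def pvGsum (ent en : List Int) (a b off : Int) : Int :=
  ((List.range (b - a - 1).toNat).map
    (fun (k : Nat) => min (PySem.List.pyGetD ent (a + 1 + (k : Int)) 0)
                  (PySem.List.pyGetD en (off + (k : Int)) 0))).sum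
def pvBsum (ent en : List Int) : Int → List Int → Int
  | _, [] => 0
  | a, b :: rest => pvGsum ent en a b 0 + pvBsum ent en b rest
def pvZrec : List (Int × Int) → List Int
  | [] => []
  | (e, _) :: r => if e = 0 then 0 :: (pvZrec r).map (· + 1) else (pvZrec r).map (· + 1)

theorem pvZrec_nonneg : ∀ (z : List (Int × Int)), ∀ x ∈ pvZrec z, 0 ≤ x := by
  intro z
  induction z with
  | nil => simp [pvZrec]
  | cons hd tl ih =>
    obtain ⟨e, g⟩ := hd
    by_cases h : e = 0 <;> simp_all [pvZrec] <;> intro x hx <;>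
      have := ih x hx <;> omega

theorem pvGetD_cons_succ (x : Int) (l : List Int) (m : Int) (hm : 0 ≤ m) :
    PySem.List.pyGetD (x :: l) (m + 1) 0 = PySem.List.pyGetD l m 0 := by
  rw [PySem.List.pyGetD_of_nonneg _ _ (by omega), PySem.List.pyGetD_of_nonneg _ _ hm]
  have : (m + 1).toNat = m.toNat + 1 := by omega
  rw [this, List.getD_cons_succ]

theorem pvGsum_shift (g : Int) (ent en : List Int) (a b : Int) (ha : -1 ≤ a) :
    pvGsum (g :: ent) en (a + 1) (b + 1) 0 = pvGsum ent en a b 0 := by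
  unfold pvGsum
  have he : b + 1 - (a + 1) - 1 = b - a - 1 := by ring
  rw [he]
  congr 1
  apply List.map_congr_left
  intro k hk
  have h1 : a + 1 + 1 + (k : Int) = (a + 1 + (k : Int)) + 1 := by ring
  rw [h1, pvGetD_cons_succ _ _ _ (by have := Int.natCast_nonneg k; omega)]

theorem pvBsum_shift (ent en : List Int) : ∀ (L : List Int) (g a : Int), -1 ≤ a →
    (∀ x ∈ L, 0 ≤ x) →
    pvBsum (g :: ent) en (a + 1) (L.map (· + 1)) = pvBsum ent en a L := by
  intro L
  induction L with
  | nil => intro g a _ _; simp [pvBsum]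
  | cons b rest ih =>
    intro g a ha hL
    have hb : 0 ≤ b := hL b (by simp)
    simp only [List.map_cons, pvBsum]
    rw [pvGsum_shift _ _ _ _ _ ha, ih g b (by omega) (fun x hx => hL x (by simp [hx]))]

theorem pvGsum_cons_split (g : Int) (ent en : List Int) (b i : Int) (hb : 0 ≤ b) :
    pvGsum (g :: ent) en (-1) (b + 1) i
      = min g (PySem.List.pyGetD en i 0) + pvGsum ent en (-1) b (i + 1) := by
  unfold pvGsum
  have h1 : b + 1 - (-1) - 1 = b + 1 := by ring
  have h2 : b - (-1) - 1 = b := by ring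
  rw [h1, h2]
  have h3 : (b + 1).toNat = b.toNat + 1 := by omega
  rw [h3, List.range_succ_eq_map, List.map_cons, List.map_map, List.sum_cons]
  congr 1
  · norm_num
  · congr 1
    apply List.map_congr_left
    intro k hk
    simp only [Function.comp]
    have e1 : (-1) + 1 + ((k + 1 : Nat) : Int) = (k : Int) + 1 := by push_cast; ring
    have e2 : i + ((k + 1 : Nat) : Int) = (i + 1) + (k : Int) := by push_cast; ring
    have e3 : ((-1) + 1 + (k : Int)) = (k : Int) := by ring
    rw [e1, e2, e3]
    rw [pvGetD_cons_succ _ _ _ (by positivity)]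

def pvBgen (ent en : List Int) (i : Int) : List Int → Int
  | [] => 0
  | b :: rest => pvGsum ent en (-1) b i + pvBsum ent en b rest

theorem pvBgen_zero (ent en : List Int) (L : List Int) :
    pvBgen ent en 0 L = pvBsum ent en (-1) L := by
  cases L <;> rfl

theorem pv_fold_eq_Bsum (ent en : List Int) : ∀ (L : List Int) (a t : Int),
    (((a :: L).zip L).foldl
      (fun total ab =>
        (PySem.List.pyRange 0 (ab.2 - ab.1 - 1) 1).foldl
          (fun t j => t + min (PySem.List.pyGetD ent (ab.1 + 1 + j) 0)
                              (PySem.List.pyGetD en j 0)) total) t)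
      = t + pvBsum ent en a L := by
  intro L
  induction L with
  | nil => intro a t; simp [pvBsum]
  | cons b rest ih =>
    intro a t
    simp only [List.zip_cons_cons, List.foldl_cons]
    rw [ih b]
    simp only [pvBsum]
    rw [PySem.List.foldl_add]
    have : ((PySem.List.pyRange 0 (b - a - 1) 1).map
        (fun j => min (PySem.List.pyGetD ent (a + 1 + j) 0) (PySem.List.pyGetD en j 0))).sum
        = pvGsum ent en a b 0 := by
      rw [PySem.List.pyRange_one, List.map_map]
      unfold pvGsum
      simp only [Function.comp_def, sub_zero, zero_add]
    rw [this]
    ring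

theorem pv_filter_eq_zrec : ∀ (sol ent : List Int),
    (PySem.List.pyRange 0 ((sol.zip ent).length : Int) 1).filter
        (fun k => PySem.List.pyGetD sol k 0 == 0) = pvZrec (sol.zip ent) := by
  intro sol
  induction sol with
  | nil => intro ent; simp [pvZrec]
  | cons e s' ih =>
    intro ent
    cases ent with
    | nil => simp [pvZrec]
    | cons g t' =>
      have hm : pvZrec (s'.zip t')
          = ((List.range (s'.zip t').length).filter
              (fun k => PySem.List.pyGetD s' ((k : Nat) : Int) 0 == 0)).map
              (fun (k : Nat) => (k : Int)) := by
        rw [← ih t', PySem.List.pyRange_zero_natCast, List.filter_map]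
        rfl
      have htail : ∀ (F : List Nat),
          (F.map (fun (k : Nat) => ((k + 1 : Nat) : Int))) = (F.map (fun (k : Nat) => (k : Int))).map (· + 1) := by
        intro F
        rw [List.map_map]
        apply List.map_congr_left
        intro k _
        simp
      have hshift : ∀ (k : Nat),
          (PySem.List.pyGetD (e :: s') (((k + 1 : Nat)) : Int) 0 == 0)
          = (PySem.List.pyGetD s' ((k : Nat) : Int) 0 == 0) := by
        intro k
        have : (((k + 1 : Nat)) : Int) = ((k : Nat) : Int) + 1 := by push_cast; ring
        rw [this, pvGetD_cons_succ _ _ _ (by positivity)]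
      simp only [List.zip_cons_cons, List.length_cons, pvZrec]
      rw [PySem.List.pyRange_zero_natCast, List.range_succ_eq_map, List.map_cons, List.map_map,
        List.filter_cons]
      simp only [Nat.cast_zero, PySem.List.pyGetD_zero_cons]
      rw [List.filter_map]
      have hcomp : ((fun k => PySem.List.pyGetD (e :: s') k 0 == 0) ∘ ((fun (k : Nat) => (k : Int)) ∘ Nat.succ))
          = (fun k => PySem.List.pyGetD s' ((k : Nat) : Int) 0 == 0) := by
        funext k
        simpa using hshift k
      rw [hcomp]
      by_cases he : e = 0
      · have hb : (e == 0) = true := by simp [he]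
        simp only [hb, if_true]
        rw [hm, ← htail, if_pos he]
        rfl
      · have hb : (e == 0) = false := by simp [he]
        simp only [hb, Bool.false_eq_true, if_false]
        rw [hm, ← htail, if_neg he]
        rfl

theorem pv_main (en : List Int) : ∀ (sol ent : List Int) (i t : Int), 0 ≤ i →
    ((sol.zip ent).foldl
      (fun (st : Int × Int) p =>
        if p.1 ≠ 0 then (st.1 + min p.2 (PySem.List.pyGetD en st.2 0), st.2 + 1)
        else (st.1, 0)) (t, i)).1
      = t + pvBgen ent en i (pvZrec (sol.zip ent) ++ [((sol.zip ent).length : Int)]) := by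
  intro sol
  induction sol with
  | nil => intro ent i t _; simp [pvZrec, pvBgen, pvBsum, pvGsum]
  | cons e s' ih =>
    intro ent i t hi
    cases ent with
    | nil => simp [pvZrec, pvBgen, pvBsum, pvGsum]
    | cons g t' =>
      have hM : ∀ x ∈ pvZrec (s'.zip t') ++ [(((s'.zip t').length : Nat) : Int)], 0 ≤ x := by
        intro x hx
        rcases List.mem_append.mp hx with h | h
        · exact pvZrec_nonneg _ x h
        · simp at h; omega
      by_cases he : e = 0
      · subst he
        rw [List.zip_cons_cons, List.foldl_cons]
        rw [show (if ((0 : Int), g).1 ≠ 0 then ((t, i).1 + min ((0 : Int), g).2 (PySem.List.pyGetD en (t, i).2 0), (t, i).2 + 1) else ((t, i).1, 0)) = (t, 0) by simp]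
        rw [ih t' 0 t le_rfl]
        simp only [pvZrec, if_true, List.length_cons, Nat.cast_add, Nat.cast_one]
        have hsplit : (((0 : Int) :: (pvZrec (s'.zip t')).map (· + 1)) ++ [((s'.zip t').length : Int) + 1])
            = 0 :: ((pvZrec (s'.zip t') ++ [((s'.zip t').length : Int)]).map (· + 1)) := by
          simp
        rw [hsplit, pvBgen_zero]
        simp only [pvBgen]
        have h0 : pvGsum (g :: t') en (-1) 0 i = 0 := by simp [pvGsum]
        rw [h0]
        have hsh := pvBsum_shift t' en (pvZrec (s'.zip t') ++ [((s'.zip t').length : Int)]) g (-1) (by omega) hM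
        simp only [neg_add_cancel] at hsh
        rw [hsh]
        ring
      · obtain ⟨b, rest, hbr⟩ :=
          List.exists_cons_of_ne_nil (show pvZrec (s'.zip t') ++ [((s'.zip t').length : Int)] ≠ [] by simp)
        have hb : 0 ≤ b := hM b (by rw [hbr]; simp)
        have hrest : ∀ x ∈ rest, 0 ≤ x := fun x hx => hM x (by rw [hbr]; simp [hx])
        rw [List.zip_cons_cons, List.foldl_cons]
        rw [show (if (e, g).1 ≠ 0 then ((t, i).1 + min (e, g).2 (PySem.List.pyGetD en (t, i).2 0), (t, i).2 + 1) else ((t, i).1, 0)) = (t + min g (PySem.List.pyGetD en i 0), i + 1) by simp [he]]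
        rw [ih t' (i + 1) _ (by omega)]
        simp only [pvZrec, if_neg he, List.length_cons, Nat.cast_add, Nat.cast_one]
        have hsplit : ((pvZrec (s'.zip t')).map (· + 1)) ++ [((s'.zip t').length : Int) + 1]
            = (pvZrec (s'.zip t') ++ [((s'.zip t').length : Int)]).map (· + 1) := by
          simp
        rw [hsplit, hbr]
        simp only [List.map_cons, pvBgen]
        rw [pvGsum_cons_split g t' en b i hb]
        have hsh := pvBsum_shift t' en rest g b (by omega) hrest
        rw [hsh]
        ring

-- ===== VERDICT (by name: the statement is the Claim_ definition above) =====
theorem calcular_ganancia_spec : Claim_equal_calcular_ganancia := by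
  intro sol ent en _ _
  unfold Spec_calcular_ganancia calcular_ganancia calcular_ganancia_alt
  rw [pv_main en sol ent 0 0 le_rfl, pvBgen_zero]
  dsimp only
  rw [List.drop_succ_cons, List.drop_zero]
  rw [pv_fold_eq_Bsum ent en]
  have hn : (min (sol.length : Int) (ent.length : Int)) = ((sol.zip ent).length : Int) := by
    simp [List.length_zip]
  rw [hn, pv_filter_eq_zrec]
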